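-- pv_equiv track=rewrite | github.com/MisterCalm/Josephus-problem | src/Algorithm.py | generatorBegin
-- ===== SOURCE A (Python) =====
-- def generatorBegin(start, k, mainList):
--
--     secondList = []
--
--     for i in mainList:
--
--         secondList.append(i)
--
--     mainLength = len(mainList)
--
--     del secondList[start::k]
--
--     numberOfDelete = mainLength - len(secondList) - 1
--
--     step = k - (mainLength - 1 - (start + k * numberOfDelete)) - 1
--
--     return step
-- ===== SOURCE B (Python) =====
-- def generatorBegin(start, k, mainList):
--     # O(1): number of deleted elements of mainList[start::k] computed from
--     # the resolved slice bounds (len(range(...)) is constant-time), no list copy.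
--     n = len(mainList)
--     a, b, _ = slice(start, None, k).indices(n)
--     d = len(range(a, b, k))
--     return start + k * d - n
-- ===== Notes on version B (the rewrite author's own statement) =====
-- stated objective: faster
-- what changed: B replaces the list copy and slice deletion with an O(1) arithmetic computation of the number of deleted elements (resolved slice bounds + len(range)), and returns the algebraically simplified closed form start + k*d - n.
import Mathlib
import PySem

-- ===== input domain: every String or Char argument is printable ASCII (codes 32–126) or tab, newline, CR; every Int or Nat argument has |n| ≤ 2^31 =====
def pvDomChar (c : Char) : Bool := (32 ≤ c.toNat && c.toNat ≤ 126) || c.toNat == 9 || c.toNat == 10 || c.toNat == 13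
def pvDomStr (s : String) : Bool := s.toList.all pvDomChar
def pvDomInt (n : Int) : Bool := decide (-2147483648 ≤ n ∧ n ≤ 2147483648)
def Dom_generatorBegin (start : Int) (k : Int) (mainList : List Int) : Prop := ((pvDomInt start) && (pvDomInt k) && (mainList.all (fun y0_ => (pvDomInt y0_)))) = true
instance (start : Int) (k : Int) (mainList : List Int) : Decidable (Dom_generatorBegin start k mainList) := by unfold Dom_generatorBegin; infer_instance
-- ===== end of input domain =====

-- B computes the number of elements del removes arithmetically from the resolved slice
-- bounds (O(1)) instead of copying the list and deleting a slice (O(n)).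


-- ===== PORT A =====
-- Hand port of Python `del xs[start::k]` (exact for k ≠ 0; k = 0 raises ValueError and is
-- excluded by Pre_): resolve the slice as slice(start, None, k).indices(len(xs)) does and
-- remove the elements whose index lies in range(a, b, k).
def pyDelFullSlice (xs : List Int) (start : Int) (k : Int) : List Int :=
  let n : Int := xs.length
  let a : Int := if 0 < k then (if start < 0 then max (start + n) 0 else min start n)
                 else (if start < 0 then max (start + n) (-1) else min start (n - 1))
  let b : Int := if 0 < k then n else -1
  let idxs := PySem.List.pyRange a b k
  ((PySem.List.enumerate xs 0).filter (fun p => !(idxs.contains p.1))).map (fun p => p.2)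

def generatorBegin (start : Int) (k : Int) (mainList : List Int) : Int :=
  let secondList := mainList.foldl (fun acc i => acc ++ [i]) []
  let mainLength : Int := mainList.length
  let secondList2 := pyDelFullSlice secondList start k
  let numberOfDelete : Int := mainLength - secondList2.length - 1
  k - (mainLength - 1 - (start + k * numberOfDelete)) - 1

-- ===== PORT B =====
-- Hand port of Source B: resolve slice(start, None, k).indices(n) (exact for k ≠ 0) and
-- compute d = len(range(a, b, k)) by Python's closed-form range length; no list is built.
def generatorBegin_alt (start : Int) (k : Int) (mainList : List Int) : Int :=
  let n : Int := mainList.length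
  let a : Int := if 0 < k then (if start < 0 then max (start + n) 0 else min start n)
                 else (if start < 0 then max (start + n) (-1) else min start (n - 1))
  let b : Int := if 0 < k then n else -1
  let d : Int := if 0 < k then (if a < b then (b - a + k - 1) / k else 0)
                 else (if b < a then (a - b + (-k) - 1) / (-k) else 0)
  start + k * d - n

-- ===== PRECONDITION & SPEC =====
-- Python raises ValueError ("slice step cannot be zero") when k = 0, in A and in B alike.
def Pre_generatorBegin (start : Int) (k : Int) (mainList : List Int) : Prop := k ≠ 0
instance (start : Int) (k : Int) (mainList : List Int) : Decidable (Pre_generatorBegin start k mainList) := by unfold Pre_generatorBegin; infer_instance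
def pvWitness_generatorBegin : Int × Int × List Int := (1, 2, [5, 6, 7, 8])
def Spec_generatorBegin (start : Int) (k : Int) (mainList : List Int) (out : Int) : Prop := out = generatorBegin_alt start k mainList
instance (start : Int) (k : Int) (mainList : List Int) (out : Int) : Decidable (Spec_generatorBegin start k mainList out) := by unfold Spec_generatorBegin; infer_instance

-- ===== CLAIM (what is proved, stated in full; the proofs are below) =====
def Claim_equal_generatorBegin : Prop := ∀ (start : Int) (k : Int) (mainList : List Int), Dom_generatorBegin start k mainList → Pre_generatorBegin start k mainList → Spec_generatorBegin start k mainList (generatorBegin start k mainList)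

-- ===== LEMMAS AND PROOFS =====

-- the copy loop of A rebuilds the list
theorem pvFoldlAppend (l acc : List Int) :
    l.foldl (fun acc i => acc ++ [i]) acc = acc ++ l := by
  induction l generalizing acc with
  | nil => simp
  | cons x xs ih => simp [List.foldl_cons, ih]

-- two nodup integer lists with the same members have the same length
theorem pvLenEqOfNodupMem (l m : List Int) (hl : l.Nodup) (hm : m.Nodup)
    (h : ∀ x, x ∈ l ↔ x ∈ m) : l.length = m.length := by
  have : l.toFinset = m.toFinset := by
    ext x; simp [List.mem_toFinset, h x]
  calc l.length = l.toFinset.card := (List.toFinset_card_of_nodup hl).symm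
    _ = m.toFinset.card := by rw [this]
    _ = m.length := List.toFinset_card_of_nodup hm

-- deleting a nodup set of valid indices removes exactly that many elements
theorem pvDelLen (xs : List Int) (idxs : List Int) (hnd : idxs.Nodup)
    (hb : ∀ i ∈ idxs, 0 ≤ i ∧ i < (xs.length : Int)) :
    ((((PySem.List.enumerate xs 0).filter (fun p => !(idxs.contains p.1))).map (fun p => p.2)).length : Int)
      = (xs.length : Int) - (idxs.length : Int) := by
  have hcnt : (PySem.List.enumerate xs 0).countP (fun p => idxs.contains p.1) = idxs.length := by
    have h1 : (PySem.List.enumerate xs 0).countP (fun p => idxs.contains p.1)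
        = ((PySem.List.enumerate xs 0).map (fun p : Int × Int => p.1)).countP (fun i => idxs.contains i) := by
      rw [List.countP_map]; rfl
    rw [h1, PySem.List.map_fst_enumerate]
    have h2 : ((PySem.List.pyRange 0 (0 + (xs.length : Int)) 1).filter (fun i => idxs.contains i)).length = idxs.length := by
      apply pvLenEqOfNodupMem
      · exact (PySem.List.nodup_pyRange_one _ _).filter _
      · exact hnd
      · intro x
        simp only [List.mem_filter, PySem.List.mem_pyRange_one, List.contains_iff_mem]
        constructor
        · rintro ⟨_, hx⟩; exact hx
        · intro hx; exact ⟨by have := hb x hx; omega, hx⟩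
    rw [List.countP_eq_length_filter, h2]
  have hsplit := List.length_eq_length_filter_add (l := PySem.List.enumerate xs 0) (fun p : Int × Int => idxs.contains p.1)
  have hlen : (PySem.List.enumerate xs 0).length = xs.length := PySem.List.length_enumerate xs 0
  have hflt : ((PySem.List.enumerate xs 0).filter (fun p => idxs.contains p.1)).length = idxs.length := by
    rw [← List.countP_eq_length_filter]; exact hcnt
  simp only [List.length_map]
  omega

-- a pyRange with nonzero step has no duplicates
theorem pvNodupPyRange (a b k : Int) (hk : k ≠ 0) : (PySem.List.pyRange a b k).Nodup := by
  have : ∀ cnt : Nat, ((List.range cnt).map (fun j : Nat => a + k * (j : Int))).Nodup := by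
    intro cnt
    apply List.Nodup.map _ (List.nodup_range)
    intro i j hij
    have : k * (i : Int) = k * (j : Int) := by linarith
    have := mul_left_cancel₀ hk this
    exact_mod_cast this
  simp only [PySem.List.pyRange, hk, if_false]
  split <;> exact this _
-- (the two branches of pyRange's count are both of the mapped-range shape)

-- membership bounds of the deleted-index range, positive step
theorem pvPosBounds (a n k x : Int) (hk : 0 < k) (ha : 0 ≤ a)
    (hx : x ∈ PySem.List.pyRange a n k) : 0 ≤ x ∧ x < n := by
  have := (PySem.List.mem_pyRange_iff_of_pos hk x).mp hx
  omega

-- membership bounds of the deleted-index range, negative step (range(a, -1, k))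
theorem pvNegBounds (a k x : Int) (hk : k < 0)
    (hx : x ∈ PySem.List.pyRange a (-1) k) : 0 ≤ x ∧ x ≤ a := by
  have hk0 : k ≠ 0 := by omega
  simp only [PySem.List.pyRange, hk0, if_false, List.mem_map, List.mem_range] at hx
  rw [if_neg (by omega : ¬ 0 < k)] at hx
  obtain ⟨j, hj, rfl⟩ := hx
  by_cases hba : (-1 : Int) < a
  · rw [if_pos hba] at hj
    set m : Int := a - (-1) + -k - 1 with hm
    have hmn : 0 ≤ m := by omega
    have hdm := Int.mul_ediv_add_emod m (-k)
    have hr0 : 0 ≤ m % (-k) := Int.emod_nonneg m (by omega)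
    have hrk : m % (-k) < -k := Int.emod_lt_of_pos m (by omega)
    have hq0 : 0 ≤ m / (-k) := Int.ediv_nonneg hmn (by omega)
    have hjq : (j : Int) < m / (-k) := by omega
    have hmul : (-k) * ((j : Int) + 1) ≤ (-k) * (m / (-k)) :=
      mul_le_mul_of_nonneg_left (by omega) (by omega)
    have hje : 0 ≤ (j : Int) := Int.natCast_nonneg j
    constructor
    · nlinarith
    · nlinarith
  · rw [if_neg hba] at hj; omega

-- Python's closed-form length of range(a, b, k)
theorem pvLenPos (a b k : Int) (hk : 0 < k) :
    ((PySem.List.pyRange a b k).length : Int) = if a < b then (b - a + k - 1) / k else 0 := by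
  have hk0 : k ≠ 0 := by omega
  simp only [PySem.List.pyRange, hk0, if_false, hk, if_pos, List.length_map, List.length_range]
  split
  · next h => exact Int.toNat_of_nonneg (Int.ediv_nonneg (by omega) (by omega))
  · simp

theorem pvLenNeg (a b k : Int) (hk : k < 0) :
    ((PySem.List.pyRange a b k).length : Int) = if b < a then (a - b + -k - 1) / -k else 0 := by
  have hk0 : k ≠ 0 := by omega
  simp only [PySem.List.pyRange, hk0, if_false, not_lt.mpr (le_of_lt hk), if_neg,
    List.length_map, List.length_range]
  split
  · next h => exact Int.toNat_of_nonneg (Int.ediv_nonneg (by omega) (by omega))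
  · simp

-- the two ports agree whenever k ≠ 0
theorem pvMain (start k : Int) (xs : List Int) (hk : k ≠ 0) :
    generatorBegin start k xs = generatorBegin_alt start k xs := by
  unfold generatorBegin generatorBegin_alt pyDelFullSlice
  simp only [pvFoldlAppend, List.nil_append]
  set n : Int := (xs.length : Int) with hn
  have hn0 : 0 ≤ n := by positivity
  set a : Int := if 0 < k then (if start < 0 then max (start + n) 0 else min start n)
                 else (if start < 0 then max (start + n) (-1) else min start (n - 1)) with ha
  set b : Int := if 0 < k then n else -1 with hb
  set idxs := PySem.List.pyRange a b k with hidxs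
  have hbnd : ∀ i ∈ idxs, 0 ≤ i ∧ i < n := by
    intro i hi
    rcases lt_or_gt_of_ne hk with hneg | hpos
    · have hb' : b = -1 := by rw [hb, if_neg (by omega)]
      rw [hidxs, hb'] at hi
      have h1 := pvNegBounds a k i hneg hi
      have ha' : a ≤ n - 1 := by
        rw [ha, if_neg (by omega : ¬ 0 < k)]
        split <;> omega
      omega
    · have hb' : b = n := by rw [hb, if_pos hpos]
      rw [hidxs, hb'] at hi
      have ha' : 0 ≤ a := by
        rw [ha, if_pos hpos]
        split <;> omega
      exact pvPosBounds a n k i hpos ha' hi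
  have hlen := pvDelLen xs idxs (pvNodupPyRange a b k hk) (by rw [← hn]; exact hbnd)
  rw [← hn] at hlen
  have hd : (idxs.length : Int)
      = (if 0 < k then (if a < b then (b - a + k - 1) / k else 0)
         else (if b < a then (a - b + (-k) - 1) / (-k) else 0)) := by
    rcases lt_or_gt_of_ne hk with hneg | hpos
    · rw [hidxs, pvLenNeg a b k hneg, if_neg (by omega : ¬ 0 < k)]
    · rw [hidxs, pvLenPos a b k hpos, if_pos hpos]
  rw [hlen, ← hd]
  ring

-- ===== VERDICT (by name: the statement is the Claim_ definition above) =====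
theorem generatorBegin_spec : Claim_equal_generatorBegin := by
  intro start k mainList _ hpre
  unfold Spec_generatorBegin
  exact pvMain start k mainList hpre
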